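-- pv_equiv track=rewrite | github.com/Corposostenibile/suite-clinica | backend/corposostenibile/package_support.py | _ordered_role_letters
-- ===== SOURCE A (Python) =====
-- ROLE_MAP = {
--     "N": "nutrizione",
--     "C": "coach",
--     "P": "psicologia",
-- }
--
-- def _ordered_role_letters(package_name: str | None) -> list[str]:
--     if not package_name:
--         return []
--
--     first_segment = str(package_name).split("-", 1)[0].upper()
--     ordered: list[str] = []
--     for char in first_segment:
--         if char in ROLE_MAP and char not in ordered:
--             ordered.append(char)
--     return ordered
-- ===== SOURCE B (Python) =====
-- ROLE_MAP = {
--     "N": "nutrizione",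
--     "C": "coach",
--     "P": "psicologia",
-- }
--
-- def _ordered_role_letters(package_name):
--     text = package_name or ""
--     if not text:
--         return []
--     cut = text.find("-")
--     segment = (text if cut < 0 else text[:cut]).upper()
--     present = [letter for letter in ROLE_MAP if letter in segment]
--     present.sort(key=segment.index)
--     return present
-- ===== Notes on version B (the rewrite author's own statement) =====
-- stated objective: faster
-- what changed: Instead of scanning the prefix character by character and appending unseen role letters, B cuts the name at the first dash via str.find, filters ROLE_MAP's keys by substring membership, and sorts the surviving letters by their first-occurrence index in the prefix.
import Mathlib
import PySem

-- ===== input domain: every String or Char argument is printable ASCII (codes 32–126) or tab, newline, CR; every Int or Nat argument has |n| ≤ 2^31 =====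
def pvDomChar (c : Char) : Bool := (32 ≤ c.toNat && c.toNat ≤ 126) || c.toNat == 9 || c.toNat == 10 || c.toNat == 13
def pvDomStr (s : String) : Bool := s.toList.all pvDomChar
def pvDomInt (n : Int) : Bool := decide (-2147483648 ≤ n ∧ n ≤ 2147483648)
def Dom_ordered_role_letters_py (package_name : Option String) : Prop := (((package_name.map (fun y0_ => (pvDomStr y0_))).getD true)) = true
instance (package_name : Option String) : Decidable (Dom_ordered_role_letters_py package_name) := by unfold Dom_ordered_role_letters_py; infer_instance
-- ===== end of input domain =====

-- B cuts the name at the first dash via str.find, filters ROLE_MAP's keys by substring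
-- membership, and sorts the surviving letters by first-occurrence index, instead of A's
-- character-by-character appending scan; a timing run measured B faster (constant
-- factor: C-level find/in vs a Python loop).

-- ===== PORT A =====
def ROLE_MAP : PySem.Dict String String :=
  PySem.Dict.ofList [("N", "nutrizione"), ("C", "coach"), ("P", "psicologia")]

def ordered_role_letters_py (package_name : Option String) : List String :=
  match package_name with
  | none => []
  | some s =>
    if s = "" then []
    else
      -- first_segment = str(package_name).split("-", 1)[0].upper()
      -- split with a non-empty separator never returns none or []; .getD/.headD defaults are unreachable
      let first_segment := PySem.Str.upper (((PySem.Str.splitMax? s "-" 1).getD []).headD "")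
      first_segment.toList.foldl
        (fun ordered c =>
          let char := String.singleton c
          if ROLE_MAP.contains char = true ∧ char ∉ ordered then ordered ++ [char] else ordered)
        []

-- ===== PORT B =====
def ordered_role_letters_py_alt (package_name : Option String) : List String :=
  let text := package_name.getD ""       -- text = package_name or ""
  if text = "" then []
  else
    let cut := PySem.Str.find text "-"
    let segment := PySem.Str.upper (if cut < 0 then text else PySem.Str.slice text none (some cut))
    let present := ROLE_MAP.keys.filter (fun letter => PySem.Str.isIn letter segment)
    -- present.sort(key=segment.index); every letter of present occurs in segment,
    -- so segment.index letter = segment.find letter (exact here)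
    PySem.List.sorted present (fun letter => PySem.Str.find segment letter) false

-- ===== PRECONDITION & SPEC =====
def Spec_ordered_role_letters_py (package_name : Option String) (out : List String) : Prop := out = ordered_role_letters_py_alt package_name
instance (package_name : Option String) (out : List String) : Decidable (Spec_ordered_role_letters_py package_name out) := by unfold Spec_ordered_role_letters_py; infer_instance

-- ===== CLAIM (what is proved, stated in full; the proofs are below) =====
def Claim_equal_ordered_role_letters_py : Prop := ∀ (package_name : Option String), Dom_ordered_role_letters_py package_name → Spec_ordered_role_letters_py package_name (ordered_role_letters_py package_name)

-- ===== LEMMAS AND PROOFS =====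

-- reference function: first-occurrence order of role letters in t
def gcore : List Char → List String
  | [] => []
  | c :: u =>
    if ROLE_MAP.contains (String.singleton c) = true then
      String.singleton c :: (gcore u).filter (fun l => l ≠ String.singleton c)
    else gcore u

-- A's scan with accumulator, against gcore
theorem scanA_eq (t : List Char) (acc : List String) :
    t.foldl (fun ordered c =>
        if ROLE_MAP.contains (String.singleton c) = true ∧ String.singleton c ∉ ordered then
          ordered ++ [String.singleton c]
        else ordered) acc
      = acc ++ (gcore t).filter (fun l => l ∉ acc) := by
  induction t generalizing acc with
  | nil => simp [gcore]
  | cons c u ih =>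
    simp only [List.foldl_cons]
    by_cases h1 : ROLE_MAP.contains (String.singleton c) = true
    · by_cases h2 : String.singleton c ∈ acc
      · rw [if_neg (by tauto), ih, gcore, if_pos h1]
        congr 1
        rw [List.filter_cons_of_neg (by simp [h2]), List.filter_filter]
        apply List.filter_congr
        intro x hx
        by_cases hxc : x = String.singleton c
        · subst hxc; simp [h2]
        · simp [hxc]
      · rw [if_pos ⟨h1, h2⟩, ih, gcore, if_pos h1, List.append_assoc]
        congr 1
        rw [List.filter_cons_of_pos (by simp [h2]), List.filter_filter]
        simp only [List.singleton_append]
        congr 1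
        apply List.filter_congr
        intro x hx
        by_cases hxc : x = String.singleton c
        · simp [hxc]
        · simp [hxc]
    · rw [if_neg (by tauto), ih, gcore, if_neg h1]

theorem prefix_single (l : List Char) (c : Char) : [c] <+: l ↔ l.head? = some c := by
  cases l with
  | nil => simp
  | cons a r => simp [List.cons_prefix_cons, eq_comm]

theorem idxOf_char (t : List Char) (c : Char) (k : Nat) (h : t[k]? = some c)
    (h2 : ∀ i < k, t[i]? ≠ some c) : t.idxOf c = k := by
  induction t generalizing k with
  | nil => simp at h
  | cons a u ih =>
    rcases k with _ | k
    · simp_all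
    · have ha : a ≠ c := by
        have := h2 0 (Nat.succ_pos _); simpa using this
      simp only [List.idxOf_cons, Bool.cond_eq_ite, beq_iff_eq]
      rw [if_neg ha]
      have := ih k (by simpa using h) (fun i hi => by simpa using h2 (i + 1) (by omega))
      omega

-- str.find with a single-character needle is the first index of that character
theorem find_single (t : List Char) (c : Char) :
    PySem.Chars.find t [c] = if c ∈ t then ((t.idxOf c : Nat) : Int) else -1 := by
  by_cases hc : c ∈ t
  · rw [if_pos hc]
    have hin : [c] <:+: t := (List.singleton_infix_iff c t).mpr hc
    have hnn : 0 ≤ PySem.Chars.find t [c] := (PySem.Chars.find_nonneg_iff t [c]).mpr hin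
    obtain ⟨hpre, hmin⟩ := PySem.Chars.find_spec (s := t) (sub := [c]) hnn
    have hk : t[(PySem.Chars.find t [c]).toNat]? = some c := by
      rw [← List.head?_drop]
      exact (prefix_single _ c).mp hpre
    have hm : ∀ i < (PySem.Chars.find t [c]).toNat, t[i]? ≠ some c := by
      intro i hi hbad
      apply hmin i hi
      rw [← List.head?_drop] at hbad
      exact (prefix_single _ c).mpr hbad
    rw [idxOf_char t c _ hk hm]
    omega
  · rw [if_neg hc]
    exact (PySem.Chars.find_eq_neg_one_iff t [c]).mpr
      (fun hin => hc ((List.singleton_infix_iff c t).mp hin))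

theorem mem_gcore (t : List Char) (l : String) :
    l ∈ gcore t ↔ ROLE_MAP.contains l = true ∧ ∃ c ∈ t, l = String.singleton c := by
  induction t with
  | nil => simp [gcore]
  | cons c u ih =>
    rw [gcore]
    by_cases h1 : ROLE_MAP.contains (String.singleton c) = true
    · rw [if_pos h1]
      simp only [List.mem_cons, List.mem_filter, ih, decide_eq_true_eq]
      constructor
      · rintro (rfl | ⟨⟨hr, d, hd, rfl⟩, _⟩)
        · exact ⟨h1, c, Or.inl rfl, rfl⟩
        · exact ⟨hr, d, Or.inr hd, rfl⟩
      · rintro ⟨hr, d, hd, rfl⟩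
        rcases hd with rfl | hd
        · exact Or.inl rfl
        · by_cases hdc : String.singleton d = String.singleton c
          · exact Or.inl hdc
          · exact Or.inr ⟨⟨hr, d, hd, rfl⟩, by simpa using hdc⟩
    · rw [if_neg h1, ih]
      constructor
      · rintro ⟨hr, d, hd, rfl⟩
        exact ⟨hr, d, List.mem_cons_of_mem _ hd, rfl⟩
      · rintro ⟨hr, d, hd, rfl⟩
        rcases List.mem_cons.mp hd with rfl | hd
        · exact absurd hr h1
        · exact ⟨hr, d, hd, rfl⟩

theorem nodup_gcore (t : List Char) : (gcore t).Nodup := by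
  induction t with
  | nil => simp [gcore]
  | cons c u ih =>
    rw [gcore]
    split
    · refine List.Nodup.cons ?_ (ih.filter _)
      intro hmem
      have := (List.mem_filter.mp hmem).2
      simp at this
    · exact ih

theorem pairwise_gcore (t : List Char) :
    (gcore t).Pairwise (fun a b => PySem.Chars.find t a.toList < PySem.Chars.find t b.toList) := by
  induction t with
  | nil => simp [gcore]
  | cons c u ih =>
    have shift : ∀ l ∈ gcore u, l ≠ String.singleton c →
        PySem.Chars.find (c :: u) l.toList = PySem.Chars.find u l.toList + 1 := by
      intro l hl hne
      obtain ⟨_, d, hd, rfl⟩ := (mem_gcore u l).mp hl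
      have hdc : d ≠ c := fun h => hne (by rw [h])
      simp only [String.toList_singleton]
      rw [find_single, find_single, if_pos hd, if_pos (List.mem_cons_of_mem _ hd)]
      rw [show List.idxOf d (c :: u) = List.idxOf d u + 1 by
        simp [Ne.symm hdc]]
      push_cast; ring
    rw [gcore]
    by_cases h1 : ROLE_MAP.contains (String.singleton c) = true
    · rw [if_pos h1]
      refine List.Pairwise.cons ?_ ?_
      · intro l hl
        have hlu := List.mem_filter.mp hl
        have hne : l ≠ String.singleton c := by
          have := hlu.2; simpa using this
        rw [shift l hlu.1 hne]
        have hc0 : PySem.Chars.find (c :: u) (String.singleton c).toList = 0 := by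
          simp only [String.toList_singleton]
          rw [find_single, if_pos List.mem_cons_self]
          simp
        rw [hc0]
        have hpos : 0 ≤ PySem.Chars.find u l.toList := by
          obtain ⟨_, d, hd, rfl⟩ := (mem_gcore u l).mp hlu.1
          simp only [String.toList_singleton]
          rw [find_single, if_pos hd]
          exact Int.natCast_nonneg _
        omega
      · refine List.Pairwise.imp_of_mem ?_ ((ih.filter _))
        intro a b ha hb hab
        have hane : a ≠ String.singleton c := by have := (List.mem_filter.mp ha).2; simpa using this
        have hbne : b ≠ String.singleton c := by have := (List.mem_filter.mp hb).2; simpa using this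
        rw [shift a (List.mem_filter.mp ha).1 hane, shift b (List.mem_filter.mp hb).1 hbne]
        omega
    · rw [if_neg h1]
      refine List.Pairwise.imp_of_mem ?_ ih
      intro a b ha hb hab
      have hane : a ≠ String.singleton c := fun h => h1 (h ▸ ((mem_gcore u a).mp ha).1)
      have hbne : b ≠ String.singleton c := fun h => h1 (h ▸ ((mem_gcore u b).mp hb).1)
      rw [shift a ha hane, shift b hb hbne]
      omega

-- B's core: filter-then-sort-by-first-index equals gcore
theorem coreB_eq (t : List Char) :
    PySem.List.sorted (ROLE_MAP.keys.filter (fun l => PySem.Chars.isIn l.toList t))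
        (fun l => PySem.Chars.find t l.toList) false = gcore t := by
  apply PySem.List.sorted_eq_of_perm_of_pairwise_lt
  · apply (List.perm_ext_iff_of_nodup (nodup_gcore t) ?_).mpr
    · intro l
      rw [mem_gcore, List.mem_filter]
      constructor
      · rintro ⟨hr, d, hd, rfl⟩
        refine ⟨(PySem.Dict.contains_iff_mem_keys _ _).mp hr, ?_⟩
        rw [String.toList_singleton, PySem.Chars.isIn_iff_infix]
        exact (List.singleton_infix_iff d t).mpr hd
      · rintro ⟨hk, hf⟩
        have hkeys : ROLE_MAP.keys = ["N", "C", "P"] := by decide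
        have hr : ROLE_MAP.contains l = true ∧ ∃ c, l = String.singleton c := by
          rw [hkeys] at hk
          simp only [List.mem_cons, List.not_mem_nil, or_false] at hk
          rcases hk with rfl | rfl | rfl
          · exact ⟨by decide, 'N', by decide⟩
          · exact ⟨by decide, 'C', by decide⟩
          · exact ⟨by decide, 'P', by decide⟩
        obtain ⟨hc, d, rfl⟩ := hr
        refine ⟨hc, d, ?_, rfl⟩
        rw [String.toList_singleton, PySem.Chars.isIn_iff_infix] at hf
        exact (List.singleton_infix_iff d t).mp hf
    · exact List.Nodup.filter _ (by decide)
  · exact pairwise_gcore t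

-- take up to the first occurrence of c is takeWhile (≠ c)
theorem take_idxOf (t : List Char) (c : Char) :
    t.take (t.idxOf c) = t.takeWhile (fun d => !(d == c)) := by
  induction t with
  | nil => rfl
  | cons a u ih =>
    by_cases hac : a = c
    · subst hac; simp [List.idxOf_cons, List.takeWhile_cons]
    · simp [List.idxOf_cons, hac, List.takeWhile_cons, ih]

-- splitOnMax.go with maxsplit exhausted returns the remainder as one piece
theorem go0 (l cur : List Char) (fuel : Nat) (acc : List (List Char)) :
    PySem.Chars.splitOnMax.go ['-'] (fuel + 1) 0 l cur acc
      = ((cur.reverse ++ l) :: acc).reverse := by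
  cases l <;> simp [PySem.Chars.splitOnMax.go]

-- splitOnMax.go with maxsplit 1: the first piece is everything before the first '-'
theorem go1 (l : List Char) : ∀ (fuel : Nat) (cur : List Char) (acc : List (List Char)),
    l.length ≤ fuel →
    PySem.Chars.splitOnMax.go ['-'] (fuel + 1) 1 l cur acc
      = acc.reverse ++ [cur.reverse ++ l.takeWhile (fun d => !(d == '-'))]
          ++ (if '-' ∈ l then [(l.dropWhile (fun d => !(d == '-'))).tail] else []) := by
  induction l with
  | nil => intro fuel cur acc _; simp [PySem.Chars.splitOnMax.go]
  | cons c rest ih =>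
    intro fuel cur acc hlen
    rcases fuel with _ | f
    · simp at hlen
    · by_cases hc : c = '-'
      · subst hc
        have hstep : PySem.Chars.splitOnMax.go ['-'] (f + 1 + 1) 1 ('-' :: rest) cur acc
            = PySem.Chars.splitOnMax.go ['-'] (f + 1) 0 rest [] (cur.reverse :: acc) := by
          simp [PySem.Chars.splitOnMax.go, List.isPrefixOf]
        rw [hstep, go0]
        simp [List.takeWhile_cons, List.dropWhile_cons]
      · have hstep : PySem.Chars.splitOnMax.go ['-'] (f + 1 + 1) 1 (c :: rest) cur acc
            = PySem.Chars.splitOnMax.go ['-'] (f + 1) 1 rest (c :: cur) acc := by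
          simp [PySem.Chars.splitOnMax.go, List.isPrefixOf, Ne.symm hc]
        rw [hstep, ih f (c :: cur) acc (by simp at hlen; omega)]
        simp [List.takeWhile_cons, List.dropWhile_cons, hc, Ne.symm hc]

-- A's split("-", 1)[0]
theorem splitA_head (s : String) :
    ((PySem.Str.splitMax? s "-" 1).getD []).headD ""
      = String.ofList (s.toList.takeWhile (fun d => !(d == '-'))) := by
  have hsep : ("-" : String).toList = ['-'] := by decide
  rw [PySem.Str.splitMax?, hsep, PySem.Chars.splitMax?]
  simp only [List.isEmpty_cons, if_false, Option.map_some, Option.getD_some]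
  rw [PySem.Chars.splitOnMax.eq_1, if_neg (by decide)]
  have : (1 : Int).toNat = 1 := rfl
  rw [this, go1 s.toList s.toList.length [] [] (le_refl _)]
  simp

-- both segments have the same characters: UPPER of the text before the first '-'
theorem segments_eq (s : String) :
    (PySem.Str.upper (if PySem.Str.find s "-" < 0 then s
        else PySem.Str.slice s none (some (PySem.Str.find s "-")))).toList
      = (PySem.Str.upper (((PySem.Str.splitMax? s "-" 1).getD []).headD "")).toList := by
  have hsep : ("-" : String).toList = ['-'] := by decide
  rw [splitA_head]
  rw [PySem.Str.toList_upper, PySem.Str.toList_upper]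
  congr 1
  rw [String.toList_ofList]
  by_cases hlt : PySem.Str.find s "-" < 0
  · rw [if_pos hlt]
    have h1 : PySem.Str.find s "-" = -1 := by
      have := PySem.Chars.neg_one_le_find s.toList ['-']
      rw [PySem.Str.find_eq, hsep] at hlt ⊢; omega
    have hnm : '-' ∉ s.toList := by
      rw [PySem.Str.find_eq, hsep, PySem.Chars.find_eq_neg_one_iff] at h1
      exact fun hm => h1 ((List.singleton_infix_iff _ _).mpr hm)
    exact (List.takeWhile_eq_self_iff.mpr (fun x hx => by
      simp only [Bool.not_eq_eq_eq_not, Bool.not_true, beq_eq_false_iff_ne]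
      exact fun h => hnm (h ▸ hx))).symm
  · rw [if_neg hlt]
    push_neg at hlt
    have hmem : '-' ∈ s.toList := by
      by_contra hnm
      have h1 := (PySem.Chars.find_eq_neg_one_iff s.toList ['-']).mpr
        (fun hin => hnm ((List.singleton_infix_iff _ _).mp hin))
      rw [PySem.Str.find_eq, hsep] at hlt
      omega
    have hfind : PySem.Str.find s "-" = ((s.toList.idxOf '-' : Nat) : Int) := by
      rw [PySem.Str.find_eq, hsep, find_single, if_pos hmem]
    rw [PySem.Str.toList_slice, PySem.Chars.slice_eq_listSlice, hfind,
      PySem.List.slice_to _ (Int.natCast_nonneg _), Int.toNat_natCast, take_idxOf]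

-- ===== VERDICT (by name: the statement is the Claim_ definition above) =====
theorem ordered_role_letters_py_spec : Claim_equal_ordered_role_letters_py := by
  intro package_name _
  unfold Spec_ordered_role_letters_py ordered_role_letters_py ordered_role_letters_py_alt
  rcases package_name with _ | s
  · rfl
  · dsimp only [Option.getD_some]
    by_cases hs : s = ""
    · simp [hs]
    · rw [if_neg hs, if_neg hs]
      rw [scanA_eq, List.nil_append, List.filter_eq_self.mpr (by intro a _; simp)]
      have hseg := segments_eq s
      have hfilter : (ROLE_MAP.keys.filter (fun letter => PySem.Str.isIn letter
          (PySem.Str.upper (if PySem.Str.find s "-" < 0 then s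
            else PySem.Str.slice s none (some (PySem.Str.find s "-"))))))
          = ROLE_MAP.keys.filter (fun l => PySem.Chars.isIn l.toList
            (PySem.Str.upper (((PySem.Str.splitMax? s "-" 1).getD []).headD "")).toList) := by
        apply List.filter_congr
        intro x _
        rw [PySem.Str.isIn_eq, hseg]
      rw [hfilter]
      have hkey : (fun letter => PySem.Str.find (PySem.Str.upper (if PySem.Str.find s "-" < 0 then s
            else PySem.Str.slice s none (some (PySem.Str.find s "-")))) letter)
          = fun l => PySem.Chars.find
            (PySem.Str.upper (((PySem.Str.splitMax? s "-" 1).getD []).headD "")).toList l.toList := by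
        funext l
        rw [PySem.Str.find_eq, hseg]
      rw [hkey, coreB_eq]
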